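-- pv_equiv track=rewrite | github.com/kys-sheng/AI4Physics-learning-workshop | lag_eval.py | split_objects
-- ===== SOURCE A (Python) =====
-- def split_objects(term):
--     # Function to split a term into its constituent objects (FIELD, DERIVATIVE, etc.)
--     # Steps:
--     # 1. Join commutator with derivative for proper splitting
--     # 2. Split the term by 'CONTRACTIONS' and keep only the first part
--     # 3. Iterate through words, grouping them into objects based on specific keywords
--     # 4. Return the list of objects
--
--     #join commutator with derivative to split properly
--     term = term.replace('COMMUTATOR_A DERIVATIVE', 'COMMUTATOR_A_DERIVATIVE')
--     term = term.replace('COMMUTATOR_B DERIVATIVE', 'COMMUTATOR_B_DERIVATIVE')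
--     # Split the input string by 'CONTRACTIONS' and take only the first part
--     relevant_part = term.split('CONTRACTIONS')[0].strip()
--
--     # Split the relevant part by 'FIELD' and 'DERIVATIVE'
--     objects = []
--     current_item = ''
--
--     for word in relevant_part.split():
--         if word in ['FIELD', 'DERIVATIVE', 'COMMUTATOR_A_DERIVATIVE', 'COMMUTATOR_B_DERIVATIVE', 'SIGMA_BAR']:
--             if current_item:
--                 objects.append(current_item.strip())
--             current_item = word
--         else:
--             current_item += ' ' + word
--
--     # Append the last item if it exists
--     if current_item:
--         objects.append(current_item.strip())
--
--     return objects
-- ===== SOURCE B (Python) =====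
-- _KEYWORDS = ('FIELD', 'DERIVATIVE', 'COMMUTATOR_A_DERIVATIVE',
--              'COMMUTATOR_B_DERIVATIVE', 'SIGMA_BAR')
--
-- def _groups(words):
--     # recursively peel off one object: the first word plus every following
--     # word up to (not including) the next keyword
--     if not words:
--         return []
--     j = 1
--     while j < len(words) and words[j] not in _KEYWORDS:
--         j += 1
--     return [' '.join(words[:j])] + _groups(words[j:])
--
-- def split_objects(term):
--     term = term.replace('COMMUTATOR_A DERIVATIVE', 'COMMUTATOR_A_DERIVATIVE')
--     term = term.replace('COMMUTATOR_B DERIVATIVE', 'COMMUTATOR_B_DERIVATIVE')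
--     relevant_part = term.split('CONTRACTIONS')[0].strip()
--     return _groups(relevant_part.split())
-- ===== Notes on version B (the rewrite author's own statement) =====
-- stated objective: alternative
-- what changed: A scans once with a growing string accumulator it conditionally flushes; B recursively peels one whole object per step (first word plus following non-keyword words, joined in one ' '.join) from the word list, with no accumulator and no stripping.
import Mathlib
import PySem

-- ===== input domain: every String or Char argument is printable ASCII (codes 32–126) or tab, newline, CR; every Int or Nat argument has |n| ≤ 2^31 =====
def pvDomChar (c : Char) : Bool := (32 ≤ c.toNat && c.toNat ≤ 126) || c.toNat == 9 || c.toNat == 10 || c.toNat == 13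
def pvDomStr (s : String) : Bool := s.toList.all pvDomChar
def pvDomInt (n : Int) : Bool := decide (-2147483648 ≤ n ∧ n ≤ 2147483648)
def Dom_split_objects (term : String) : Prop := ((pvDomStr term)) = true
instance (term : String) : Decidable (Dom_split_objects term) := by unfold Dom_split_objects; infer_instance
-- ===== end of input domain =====

-- B replaces A's flush-on-keyword string accumulator by recursive extraction of one whole
-- object (first word plus following non-keyword words, one join) per step; alternative
-- decomposition, same cost.

-- the keyword list both Pythons carry (A inline in its loop, B as _KEYWORDS)
def kwTokens : List String :=
  ["FIELD", "DERIVATIVE", "COMMUTATOR_A_DERIVATIVE", "COMMUTATOR_B_DERIVATIVE", "SIGMA_BAR"]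

-- ===== PORT A =====

-- A's loop body (current_item kept as List Char; `current_item += ' ' + word` is `++ ' ' :: word.toList`)
def stepA (acc : List String × List Char) (word : String) : List String × List Char :=
  if kwTokens.contains word then
    (if acc.2 ≠ [] then acc.1 ++ [String.ofList (PySem.Chars.strip acc.2)] else acc.1, word.toList)
  else
    (acc.1, acc.2 ++ ' ' :: word.toList)

-- A's trailing `if current_item: objects.append(current_item.strip())`
def finA (r : List String × List Char) : List String :=
  if r.2 ≠ [] then r.1 ++ [String.ofList (PySem.Chars.strip r.2)] else r.1

def split_objects (term : String) : List String :=
  let term1 := PySem.Str.replace term "COMMUTATOR_A DERIVATIVE" "COMMUTATOR_A_DERIVATIVE"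
  let term2 := PySem.Str.replace term1 "COMMUTATOR_B DERIVATIVE" "COMMUTATOR_B_DERIVATIVE"
  -- term.split('CONTRACTIONS')[0]: the separator is nonempty so split? is some and never empty,
  -- the getD/headD defaults are unreachable
  let relevant_part := PySem.Str.strip (((PySem.Str.split? term2 "CONTRACTIONS").getD []).headD "")
  finA ((PySem.Str.split₀ relevant_part).foldl stepA ([], []))

-- ===== PORT B =====
-- Source B's _groups: the while loop finds the first keyword position j ≥ 1, so
-- words[:j] = head :: takeWhile (not keyword) tail and words[j:] = dropWhile (not keyword) tail
def groupsB : List String → List String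
  | [] => []
  | w :: rest =>
    PySem.Str.join " " (w :: rest.takeWhile (fun x => !(kwTokens.contains x)))
      :: groupsB (rest.dropWhile (fun x => !(kwTokens.contains x)))
  termination_by ws => ws.length
  decreasing_by simp only [List.length_cons]; exact Nat.lt_succ_of_le (List.length_dropWhile_le _ _)

def split_objects_alt (term : String) : List String :=
  let term1 := PySem.Str.replace term "COMMUTATOR_A DERIVATIVE" "COMMUTATOR_A_DERIVATIVE"
  let term2 := PySem.Str.replace term1 "COMMUTATOR_B DERIVATIVE" "COMMUTATOR_B_DERIVATIVE"
  let relevant_part := PySem.Str.strip (((PySem.Str.split? term2 "CONTRACTIONS").getD []).headD "")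
  groupsB (PySem.Str.split₀ relevant_part)

-- ===== PRECONDITION & SPEC =====
def Spec_split_objects (term : String) (out : List String) : Prop := out = split_objects_alt term
instance (term : String) (out : List String) : Decidable (Spec_split_objects term out) := by
  unfold Spec_split_objects; infer_instance

-- ===== CLAIM (what is proved, stated in full; the proofs are below) =====
def Claim_equal_split_objects : Prop :=
  ∀ (term : String), Dom_split_objects term → Spec_split_objects term (split_objects term)

-- ===== LEMMAS AND PROOFS =====

-- a word produced by str.split(): nonempty, no whitespace characters
def GoodW (w : String) : Prop :=
  w.toList ≠ [] ∧ ∀ c ∈ w.toList, PySem.Chars.isspace c = false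

-- ' '.join of a word list, in the recursive shape the proofs use
def myJoin : List String → List Char
  | [] => []
  | [w] => w.toList
  | w :: g => w.toList ++ ' ' :: myJoin g

theorem myJoin_cons (w : String) (g : List String) (h : g ≠ []) :
    myJoin (w :: g) = w.toList ++ ' ' :: myJoin g := by
  cases g with
  | nil => exact absurd rfl h
  | cons a t => rfl

theorem myJoin_ne_nil (g : List String) (h : g ≠ []) (hg : ∀ w ∈ g, GoodW w) :
    myJoin g ≠ [] := by
  cases g with
  | nil => exact absurd rfl h
  | cons w t =>
    cases t with
    | nil => exact (hg w (by simp)).1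
    | cons b t' => simp [myJoin]

theorem myJoin_append_single (g : List String) (w : String) (h : g ≠ []) :
    myJoin (g ++ [w]) = myJoin g ++ ' ' :: w.toList := by
  induction g with
  | nil => exact absurd rfl h
  | cons a t ih =>
    cases t with
    | nil => rfl
    | cons b t' =>
      rw [List.cons_append,
          myJoin_cons a ((b :: t') ++ [w]) (by simp),
          myJoin_cons a (b :: t') (by simp), ih (by simp)]
      simp

theorem chars_join_eq (g : List String) :
    PySem.Chars.join [' '] (g.map String.toList) = myJoin g := by
  induction g with
  | nil => simp [myJoin, PySem.Chars.join_nil]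
  | cons w t ih =>
    cases t with
    | nil => simp [myJoin, PySem.Chars.join_singleton]
    | cons b t' =>
      rw [List.map_cons, List.map_cons, PySem.Chars.join_cons_cons,
          myJoin_cons w (b :: t') (by simp), ← List.map_cons, ih]
      simp

theorem strjoin_eq (g : List String) :
    PySem.Str.join " " g = String.ofList (myJoin g) := by
  have : (" " : String).toList = [' '] := rfl
  simp [PySem.Str.join, this, chars_join_eq]

theorem head_fact (g : List String) (h : g ≠ []) (hg : ∀ w ∈ g, GoodW w) :
    ∃ c t, myJoin g = c :: t ∧ PySem.Chars.isspace c = false := by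
  cases g with
  | nil => exact absurd rfl h
  | cons w t =>
    obtain ⟨hne, hns⟩ := hg w (by simp)
    obtain ⟨c, t', hct⟩ := List.exists_cons_of_ne_nil hne
    cases t with
    | nil => exact ⟨c, t', by simp [myJoin, hct], hns c (by simp [hct])⟩
    | cons b tb =>
      exact ⟨c, t' ++ ' ' :: myJoin (b :: tb),
        by rw [myJoin_cons w (b :: tb) (by simp), hct]; rfl,
        hns c (by simp [hct])⟩

theorem last_fact (g : List String) (h : g ≠ []) (hg : ∀ w ∈ g, GoodW w) :
    ∃ c r, (myJoin g).reverse = c :: r ∧ PySem.Chars.isspace c = false := by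
  induction g with
  | nil => exact absurd rfl h
  | cons w t ih =>
    cases t with
    | nil =>
      obtain ⟨hne, hns⟩ := hg w (by simp)
      obtain ⟨c, r, hcr⟩ := List.exists_cons_of_ne_nil
        (by simpa using hne : w.toList.reverse ≠ [])
      exact ⟨c, r, hcr, hns c (List.mem_reverse.mp (by rw [hcr]; simp))⟩
    | cons b tb =>
      obtain ⟨c, r, hcr, hc⟩ := ih (by simp) (fun x hx => hg x (by simp [hx]))
      refine ⟨c, r ++ ' ' :: w.toList.reverse, ?_, hc⟩
      rw [myJoin_cons w (b :: tb) (by simp)]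
      simp [hcr]

theorem strip_cur (g : List String) (hgne : g ≠ []) (hg : ∀ w ∈ g, GoodW w)
    (cur : List Char) (hc : cur = myJoin g ∨ cur = ' ' :: myJoin g) :
    PySem.Chars.strip cur = myJoin g := by
  obtain ⟨c, t, hhead, hcns⟩ := head_fact g hgne hg
  obtain ⟨d, r, hrev, hdns⟩ := last_fact g hgne hg
  have hsp : PySem.Chars.isspace ' ' = true := by decide
  have hl : PySem.Chars.lstrip cur = myJoin g := by
    rcases hc with h | h
    · rw [h, hhead, PySem.Chars.lstrip,
          List.dropWhile_cons_of_neg (by simp [hcns]), ← hhead]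
    · rw [h, hhead, PySem.Chars.lstrip,
          List.dropWhile_cons_of_pos (by simp [hsp]),
          List.dropWhile_cons_of_neg (by simp [hcns]), ← hhead]
  rw [PySem.Chars.strip, hl, PySem.Chars.rstrip, hrev,
      List.dropWhile_cons, hdns]
  simp [← hrev]

theorem goGood (s : List Char) : ∀ (cur : List Char) (acc : List (List Char)),
    (∀ c ∈ cur, PySem.Chars.isspace c = false) →
    (∀ w ∈ acc, w ≠ [] ∧ ∀ c ∈ w, PySem.Chars.isspace c = false) →
    ∀ w ∈ PySem.Chars.split₀.go s cur acc,
      w ≠ [] ∧ ∀ c ∈ w, PySem.Chars.isspace c = false := by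
  induction s with
  | nil =>
    intro cur acc hcur hacc w hw
    by_cases h : cur.isEmpty
    · rw [PySem.Chars.split₀.go, if_pos h] at hw
      exact hacc w (by simpa using hw)
    · rw [PySem.Chars.split₀.go, if_neg h] at hw
      rcases (by simpa using hw : w ∈ acc ∨ w = cur.reverse) with h1 | h1
      · exact hacc w h1
      · subst h1
        refine ⟨by simpa using (by simpa [List.isEmpty_iff] using h : cur ≠ []), ?_⟩
        intro c hc
        exact hcur c (List.mem_reverse.mp hc)
  | cons c rest ih =>
    intro cur acc hcur hacc w hw
    by_cases hs : PySem.Chars.isspace c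
    · by_cases h : cur.isEmpty
      · rw [PySem.Chars.split₀.go, if_pos hs, if_pos h] at hw
        exact ih [] acc (by simp) hacc w hw
      · rw [PySem.Chars.split₀.go, if_pos hs, if_neg h] at hw
        refine ih [] (cur.reverse :: acc) (by simp) ?_ w hw
        intro x hx
        rcases (by simpa using hx : x = cur.reverse ∨ x ∈ acc) with h1 | h1
        · subst h1
          refine ⟨by simpa using (by simpa [List.isEmpty_iff] using h : cur ≠ []), ?_⟩
          intro d hd
          exact hcur d (List.mem_reverse.mp hd)
        · exact hacc x h1
    · rw [PySem.Chars.split₀.go, if_neg hs] at hw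
      refine ih (c :: cur) acc ?_ hacc w hw
      intro d hd
      rcases (by simpa using hd : d = c ∨ d ∈ cur) with h1 | h1
      · subst h1; simpa using hs
      · exact hcur d h1

theorem split₀Good (s : String) : ∀ w ∈ PySem.Str.split₀ s, GoodW w := by
  intro w hw
  rw [PySem.Str.split₀] at hw
  obtain ⟨wl, hwl, rfl⟩ := List.mem_map.mp hw
  have hres := goGood s.toList [] [] (by simp) (by simp) wl
    (by rw [PySem.Chars.split₀] at hwl; exact hwl)
  exact ⟨by simpa using hres.1, by simpa using hres.2⟩

theorem innerA (ws : List String) : ∀ (objs : List String) (cur : List Char) (g : List String),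
    (∀ w ∈ ws, GoodW w) → (∀ w ∈ g, GoodW w) → g ≠ [] →
    (cur = myJoin g ∨ cur = ' ' :: myJoin g) →
    finA (ws.foldl stepA (objs, cur)) =
      objs ++ String.ofList (myJoin (g ++ ws.takeWhile (fun x => !(kwTokens.contains x))))
        :: groupsB (ws.dropWhile (fun x => !(kwTokens.contains x))) := by
  induction ws with
  | nil =>
    intro objs cur g hws hg hgne hc
    have hcur : cur ≠ [] := by
      rcases hc with h | h
      · rw [h]; exact myJoin_ne_nil g hgne hg
      · rw [h]; simp
    simp only [List.foldl_nil, List.takeWhile_nil, List.dropWhile_nil, List.append_nil]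
    rw [finA, if_pos hcur, strip_cur g hgne hg cur hc]
    simp [groupsB]
  | cons w rest ih =>
    intro objs cur g hws hg hgne hc
    have hcur : cur ≠ [] := by
      rcases hc with h | h
      · rw [h]; exact myJoin_ne_nil g hgne hg
      · rw [h]; simp
    have hw : GoodW w := hws w (by simp)
    by_cases hkw : kwTokens.contains w = true
    · have hstep : stepA (objs, cur) w = (objs ++ [String.ofList (myJoin g)], w.toList) := by
        rw [stepA, if_pos hkw, if_pos hcur,
            strip_cur g hgne hg cur hc]
      rw [List.foldl_cons, hstep,
          ih (objs ++ [String.ofList (myJoin g)]) w.toList [w]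
            (fun x hx => hws x (by simp [hx]))
            (by intro x hx; simp at hx; subst hx; exact hw)
            (by simp) (Or.inl rfl)]
      rw [List.takeWhile_cons_of_neg (by simpa using hkw),
          List.dropWhile_cons_of_neg (by simpa using hkw)]
      rw [groupsB, strjoin_eq, ← chars_join_eq]
      simp [chars_join_eq]
    · have hstep : stepA (objs, cur) w = (objs, cur ++ ' ' :: w.toList) := by
        rw [stepA, if_neg (by simpa using hkw)]
      have hshape : cur ++ ' ' :: w.toList = myJoin (g ++ [w]) ∨
          cur ++ ' ' :: w.toList = ' ' :: myJoin (g ++ [w]) := by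
        rw [myJoin_append_single g w hgne]
        rcases hc with h | h
        · left; rw [h]
        · right; rw [h]; rfl
      rw [List.foldl_cons, hstep,
          ih objs (cur ++ ' ' :: w.toList) (g ++ [w])
            (fun x hx => hws x (by simp [hx]))
            (by
              intro x hx
              rcases List.mem_append.mp hx with h1 | h1
              · exact hg x h1
              · simp at h1; subst h1; exact hw)
            (by simp) hshape]
      rw [List.takeWhile_cons_of_pos (by simpa using hkw),
          List.dropWhile_cons_of_pos (by simpa using hkw)]
      simp

theorem outerA (ws : List String) (hws : ∀ w ∈ ws, GoodW w) :
    finA (ws.foldl stepA ([], [])) = groupsB ws := by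
  cases ws with
  | nil => simp [finA, groupsB]
  | cons w rest =>
    have hw : GoodW w := hws w (by simp)
    have hrest : ∀ x ∈ rest, GoodW x := fun x hx => hws x (by simp [hx])
    have hone : ∀ x ∈ [w], GoodW x := by intro x hx; simp at hx; subst hx; exact hw
    by_cases hkw : kwTokens.contains w = true
    · have hstep : stepA ([], []) w = ([], w.toList) := by
        rw [stepA, if_pos hkw]; simp
      rw [List.foldl_cons, hstep,
          innerA rest [] w.toList [w] hrest hone (by simp) (Or.inl rfl)]
      rw [groupsB, strjoin_eq]
      simp
    · have hstep : stepA ([], []) w = ([], ' ' :: w.toList) := by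
        rw [stepA, if_neg (by simpa using hkw)]
        rfl
      rw [List.foldl_cons, hstep,
          innerA rest [] (' ' :: w.toList) [w] hrest hone (by simp) (Or.inr rfl)]
      rw [groupsB, strjoin_eq]
      simp

-- ===== VERDICT (by name: the statement is the Claim_ definition above) =====
theorem split_objects_spec : Claim_equal_split_objects := by
  intro term _
  show split_objects term = split_objects_alt term
  rw [split_objects, split_objects_alt]
  exact outerA _ (split₀Good _)
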